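-- pv_equiv track=rewrite | github.com/tethal/aoc | 2024/22.py | part2
-- ===== SOURCE A (Python) =====
-- from collections import defaultdict
--
-- def gen(s):
--     s = (s ^ (s << 6)) & 16777215
--     s = (s ^ (s >> 5)) & 16777215
--     s = (s ^ (s << 11)) & 16777215
--     return s
--
-- def part2(src):
--     sums = defaultdict(int)
--     for x in map(int, src.splitlines()):
--         seen = set()
--         seq = 0, 0, 0, 0
--         for i in range(2000):
--             y = gen(x)
--             seq = seq[1], seq[2], seq[3], (y % 10) - (x % 10)
--             x = y
--             if i >= 3 and seq not in seen:
--                 seen.add(seq)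
--                 sums[seq] += y % 10
--     return max(sums.values())
-- ===== SOURCE B (Python) =====
-- def gen(s):
--     s = (s ^ (s << 6)) & 16777215
--     s = (s ^ (s >> 5)) & 16777215
--     s = (s ^ (s << 11)) & 16777215
--     return s
--
-- def part2(src):
--     sums = {}
--     for line in src.splitlines():
--         x = int(line)
--         prices = [x % 10]
--         for _ in range(2000):
--             x = gen(x)
--             prices.append(x % 10)
--         diffs = [prices[j + 1] - prices[j] for j in range(2000)]
--         local = {}
--         for j in range(1997):
--             key = (diffs[j], diffs[j + 1], diffs[j + 2], diffs[j + 3])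
--             local.setdefault(key, prices[j + 4])
--         for key, val in local.items():
--             sums[key] = sums.get(key, 0) + val
--     return max(sums.values())
-- ===== Notes on version B (the rewrite author's own statement) =====
-- stated objective: alternative
-- what changed: A fuses price generation, diff window tracking (seq tuple), a seen-set and the global totals dict into one per-buyer loop; B instead precomputes the full 2001-entry price list and the 2000 consecutive diffs per buyer, slides a 4-wide index window over the diff list recording first occurrences in a per-buyer local dict via setdefault, and merges each local dict into the global totals afterwards.
import Mathlib
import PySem

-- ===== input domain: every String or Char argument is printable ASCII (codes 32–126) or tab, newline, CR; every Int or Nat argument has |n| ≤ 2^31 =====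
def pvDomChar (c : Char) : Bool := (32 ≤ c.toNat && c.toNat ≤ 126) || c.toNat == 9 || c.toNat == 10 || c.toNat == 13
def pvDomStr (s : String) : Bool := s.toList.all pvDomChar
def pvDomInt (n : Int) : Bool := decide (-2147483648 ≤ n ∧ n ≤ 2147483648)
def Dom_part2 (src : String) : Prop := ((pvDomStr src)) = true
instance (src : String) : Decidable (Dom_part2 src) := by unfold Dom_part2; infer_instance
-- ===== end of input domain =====

-- B restructures A's fused per-buyer loop into precomputed price/diff lists with a window scan
-- and a per-buyer local dict merged at the end (objective: alternative decomposition, same cost).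

-- ===== PORT A =====
def gen (s : Int) : Int :=
  let s1 := PySem.Int.band (PySem.Int.bxor s (s <<< (6 : Nat))) 16777215
  let s2 := PySem.Int.band (PySem.Int.bxor s1 (s1 >>> (5 : Nat))) 16777215
  PySem.Int.band (PySem.Int.bxor s2 (s2 <<< (11 : Nat))) 16777215

abbrev Seq4 := Int × Int × Int × Int

-- body of A's inner 'for i in range(2000)' loop; state (x, seq, seen, sums)
def stepA (st : Int × Seq4 × PySem.Set Seq4 × PySem.Dict Seq4 Int) (i : Int) :
    Int × Seq4 × PySem.Set Seq4 × PySem.Dict Seq4 Int :=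
  let x := st.1
  let seq := st.2.1
  let seen := st.2.2.1
  let sums := st.2.2.2
  let y := gen x
  let seq' : Seq4 := (seq.2.1, seq.2.2.1, seq.2.2.2, PySem.Int.mod y 10 - PySem.Int.mod x 10)
  if 3 ≤ i then
    if PySem.Set.contains seen seq' then (y, seq', seen, sums)
    else (y, seq', PySem.Set.add seen seq',
          PySem.Dict.insert sums seq' (PySem.Dict.getD sums seq' 0 + PySem.Int.mod y 10))
  else (y, seq', seen, sums)

-- A's per-buyer fused loop over i in range(2000)
def loopA (sums : PySem.Dict Seq4 Int) (x : Int) :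
    Int × Seq4 × PySem.Set Seq4 × PySem.Dict Seq4 Int :=
  (PySem.List.pyRange 0 2000 1).foldl stepA (x, ((0, 0, 0, 0) : Seq4), PySem.Set.empty, sums)

def part2 (src : String) : Int :=
  let sums := (PySem.Str.splitlines src).foldl
      (fun sums line => (loopA sums ((PySem.Int.ofStr? line).getD 0)).2.2.2) PySem.Dict.empty
  (PySem.List.max? (PySem.Dict.values sums) (fun v => v)).getD 0

-- ===== PORT B =====
-- B: the 2001-entry price list (last digits), built front to back with the running secret
def pricesOf (x0 : Int) : Int × List Int :=
  (PySem.List.pyRange 0 2000 1).foldl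
    (fun (st : Int × List Int) _ =>
      let y := gen st.1
      (y, st.2 ++ [PySem.Int.mod y 10]))
    (x0, [PySem.Int.mod x0 10])

-- B: the 2000 consecutive diffs
def diffsOf (prices : List Int) : List Int :=
  (PySem.List.pyRange 0 2000 1).map
    (fun j => PySem.List.pyGetD prices (j + 1) 0 - PySem.List.pyGetD prices j 0)

-- B: window scan — first occurrence of each 4-diff window via setdefault
def localOf (prices diffs : List Int) : PySem.Dict Seq4 Int :=
  (PySem.List.pyRange 0 1997 1).foldl
    (fun (d : PySem.Dict Seq4 Int) j =>
      PySem.Dict.setdefault d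
        (PySem.List.pyGetD diffs j 0, PySem.List.pyGetD diffs (j + 1) 0,
         PySem.List.pyGetD diffs (j + 2) 0, PySem.List.pyGetD diffs (j + 3) 0)
        (PySem.List.pyGetD prices (j + 4) 0))
    PySem.Dict.empty

-- B's per-buyer work: prices, diffs, local first-occurrence dict, then merge into sums
def buyerB (sums : PySem.Dict Seq4 Int) (x0 : Int) : PySem.Dict Seq4 Int :=
  let prices := (pricesOf x0).2
  let locald := localOf prices (diffsOf prices)
  (PySem.Dict.items locald).foldl
    (fun s kv => PySem.Dict.insert s kv.1 (PySem.Dict.getD s kv.1 0 + kv.2)) sums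

def part2_alt (src : String) : Int :=
  let sums := (PySem.Str.splitlines src).foldl
      (fun sums line => buyerB sums ((PySem.Int.ofStr? line).getD 0)) PySem.Dict.empty
  (PySem.List.max? (PySem.Dict.values sums) (fun v => v)).getD 0

-- ===== PRECONDITION & SPEC =====
-- Pre_ excludes exactly the inputs where A raises ValueError: a line int() cannot parse, or
-- no lines at all (max() of the empty sums).
def Pre_part2 (src : String) : Prop :=
  PySem.Str.splitlines src ≠ [] ∧
    ∀ line ∈ PySem.Str.splitlines src, (PySem.Int.ofStr? line).isSome = true
instance (src : String) : Decidable (Pre_part2 src) := by unfold Pre_part2; infer_instance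

def pvWitness_part2 : String := "1\n2"

def Spec_part2 (src : String) (out : Int) : Prop := out = part2_alt src
instance (src : String) (out : Int) : Decidable (Spec_part2 src out) := by unfold Spec_part2; infer_instance

-- ===== CLAIM (what is proved, stated in full; the proofs are below) =====
def Claim_equal_part2 : Prop := ∀ (src : String), Dom_part2 src → Pre_part2 src → Spec_part2 src (part2 src)

-- ===== LEMMAS AND PROOFS =====

-- the secret-number sequence and its prices / diffs
def genIter (x : Int) : Nat → Int
  | 0 => x
  | n + 1 => gen (genIter x n)

def P (x : Int) (n : Nat) : Int := PySem.Int.mod (genIter x n) 10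

def dP (x : Int) (n : Nat) : Int := P x (n + 1) - P x n

-- the seq tuple A's loop carries after n iterations
def seqS (x : Int) : Nat → Seq4
  | 0 => (0, 0, 0, 0)
  | n + 1 => ((seqS x n).2.1, (seqS x n).2.2.1, (seqS x n).2.2.2, dP x n)

-- the j-th window event (key, price) shared by both sides
def ev (x : Int) (j : Nat) : Seq4 × Int := (seqS x (j + 4), P x (j + 4))

def mergeKV (s : PySem.Dict Seq4 Int) (kv : Seq4 × Int) : PySem.Dict Seq4 Int :=
  PySem.Dict.insert s kv.1 (PySem.Dict.getD s kv.1 0 + kv.2)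

-- A's seen/sums bookkeeping as a recursion over the event list
def AF (seen : PySem.Set Seq4) (sums : PySem.Dict Seq4 Int) :
    List (Seq4 × Int) → PySem.Set Seq4 × PySem.Dict Seq4 Int
  | [] => (seen, sums)
  | kv :: t =>
    if PySem.Set.contains seen kv.1 then AF seen sums t
    else AF (PySem.Set.add seen kv.1) (mergeKV sums kv) t

-- first-occurrence sublist of an event list, relative to an already-seen set
def FO (seen : PySem.Set Seq4) : List (Seq4 × Int) → List (Seq4 × Int)
  | [] => []
  | kv :: t =>
    if PySem.Set.contains seen kv.1 then FO seen t
    else kv :: FO (PySem.Set.add seen kv.1) t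

theorem set_contains_add {α : Type} [BEq α] [LawfulBEq α] (s : PySem.Set α) (x y : α) :
    PySem.Set.contains (PySem.Set.add s x) y = (PySem.Set.contains s y || y == x) := by
  simp only [PySem.Set.add, PySem.Set.contains]
  split_ifs with h
  · by_cases h2 : y = x
    · subst h2; simp_all
    · simp_all
  · cases h2 : y == x <;> simp_all

theorem seqS_add_four (x : Int) (j : Nat) :
    seqS x (j + 4) = (dP x j, dP x (j + 1), dP x (j + 2), dP x (j + 3)) := by
  induction j with
  | zero => simp [seqS]
  | succ j ih =>
    show seqS x (j + 4 + 1) = _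
    rw [seqS, ih]

theorem AF_snd_eq (L : List (Seq4 × Int)) : ∀ seen sums,
    (AF seen sums L).2 = (FO seen L).foldl mergeKV sums := by
  induction L with
  | nil => intro seen sums; simp [AF, FO]
  | cons kv t ih =>
    intro seen sums
    by_cases h : kv.1 ∈ seen
    · simp [AF, FO, h, ih]
    · simp [AF, FO, h, ih]

theorem AF_append (L : List (Seq4 × Int)) (e : Seq4 × Int) : ∀ seen sums,
    AF seen sums (L ++ [e]) =
      (if PySem.Set.contains (AF seen sums L).1 e.1 then AF seen sums L
       else ((AF seen sums L).1.add e.1, mergeKV (AF seen sums L).2 e)) := by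
  induction L with
  | nil => intro seen sums; by_cases h : e.1 ∈ seen <;> simp [AF, h]
  | cons kv t ih =>
    intro seen sums
    by_cases h : kv.1 ∈ seen <;> simp [AF, h, ih]

theorem setdefault_fold (L : List (Seq4 × Int)) :
    ∀ (d : PySem.Dict Seq4 Int) (seen : PySem.Set Seq4),
    (∀ k, PySem.Dict.contains d k = PySem.Set.contains seen k) →
    (L.foldl (fun d kv => PySem.Dict.setdefault d kv.1 kv.2) d).items = d.items ++ FO seen L := by
  induction L with
  | nil => intro d seen _; simp [FO]
  | cons kv t ih =>
    intro d seen hinv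
    by_cases h : kv.1 ∈ seen
    · rw [List.foldl_cons, PySem.Dict.setdefault_of_contains d kv.2 ((hinv kv.1).trans (by simp [PySem.Set.contains, h]))]
      simp [FO, h, ih d seen hinv]
    · have hd : PySem.Dict.contains d kv.1 = false := (hinv kv.1).trans (by simp [PySem.Set.contains, h])
      rw [List.foldl_cons, PySem.Dict.setdefault_of_not_contains d kv.2 hd]
      have hinv' : ∀ k, PySem.Dict.contains (d.insert kv.1 kv.2) k
          = PySem.Set.contains (seen.add kv.1) k := by
        intro k
        rw [PySem.Dict.contains_insert, set_contains_add, hinv k, Bool.or_comm]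
      rw [ih (d.insert kv.1 kv.2) (seen.add kv.1) hinv',
        PySem.Dict.items_insert_of_not_contains d kv.2 hd]
      simp [FO, h]

-- one step of A's loop once i ≥ 3, in terms of the event at that index
theorem stepA_at (x : Int) (n : Nat) (seen : PySem.Set Seq4) (sums : PySem.Dict Seq4 Int)
    (i : Int) (hi : 3 ≤ i) :
    stepA (genIter x (n + 3), seqS x (n + 3), seen, sums) i
      = if PySem.Set.contains seen (seqS x (n + 4))
        then (genIter x (n + 4), seqS x (n + 4), seen, sums)
        else (genIter x (n + 4), seqS x (n + 4), PySem.Set.add seen (seqS x (n + 4)),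
              mergeKV sums (seqS x (n + 4), P x (n + 4))) := by
  have hs : seqS x (n + 4)
      = ((seqS x (n + 3)).2.1, (seqS x (n + 3)).2.2.1, (seqS x (n + 3)).2.2.2,
         PySem.Int.mod (gen (genIter x (n + 3))) 10 - PySem.Int.mod (genIter x (n + 3)) 10) := by
    show seqS x ((n + 3) + 1) = _
    rw [seqS]; rfl
  simp only [stepA]
  rw [if_pos hi, hs]
  split_ifs with h <;> rfl

-- A's inner loop from step 3 on, characterised by AF over the event list
theorem stepsA_tail (x : Int) : ∀ (m : Nat) (seen : PySem.Set Seq4) (sums : PySem.Dict Seq4 Int),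
    (PySem.List.pyRange 3 ((m : Int) + 3) 1).foldl stepA (genIter x 3, seqS x 3, seen, sums)
      = (genIter x (m + 3), seqS x (m + 3),
         (AF seen sums ((List.range m).map (ev x))).1,
         (AF seen sums ((List.range m).map (ev x))).2) := by
  intro m
  induction m with
  | zero =>
    intro seen sums
    rw [show ((0 : Nat) : Int) + 3 = 3 by norm_num, PySem.List.pyRange_one_eq_nil le_rfl]
    simp [AF]
  | succ m ih =>
    intro seen sums
    rw [show ((m + 1 : Nat) : Int) + 3 = ((m : Int) + 3) + 1 by push_cast; ring,
      PySem.List.pyRange_one_succ_right (by omega), List.foldl_append, ih seen sums]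
    rw [List.range_succ, List.map_append, List.map_cons, List.map_nil,
      show ev x m = (seqS x (m + 4), P x (m + 4)) from rfl, AF_append]
    simp only [List.foldl_cons, List.foldl_nil]
    rw [stepA_at x m _ _ _ (by omega)]
    split_ifs with h <;> rfl

-- A's full inner loop, at tuple level
theorem loopA_eq (sums : PySem.Dict Seq4 Int) (x : Int) :
    loopA sums x
      = (genIter x 2000, seqS x 2000,
         (AF PySem.Set.empty sums ((List.range 1997).map (ev x))).1,
         (AF PySem.Set.empty sums ((List.range 1997).map (ev x))).2) := by
  unfold loopA
  rw [PySem.List.pyRange_one_append 0 3 2000 (by norm_num) (by norm_num), List.foldl_append]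
  rw [show PySem.List.pyRange 0 3 1 = [0, 1, 2] from by
    rw [PySem.List.pyRange_one_cons (by norm_num), PySem.List.pyRange_one_cons (by norm_num),
      PySem.List.pyRange_one_cons (by norm_num), PySem.List.pyRange_one_eq_nil (by norm_num)]
    norm_num]
  simp only [List.foldl_cons, List.foldl_nil]
  have h0 : stepA (x, ((0, 0, 0, 0) : Seq4), PySem.Set.empty, sums) 0
      = (genIter x 1, seqS x 1, PySem.Set.empty, sums) := by
    simp only [stepA]; rw [if_neg (by norm_num)]; rfl
  have h1 : stepA (genIter x 1, seqS x 1, PySem.Set.empty, sums) 1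
      = (genIter x 2, seqS x 2, PySem.Set.empty, sums) := by
    simp only [stepA]; rw [if_neg (by norm_num)]
    have : seqS x 2 = ((seqS x 1).2.1, (seqS x 1).2.2.1, (seqS x 1).2.2.2, dP x 1) := by
      show seqS x (1 + 1) = _; rw [seqS]
    rw [this]; rfl
  have h2 : stepA (genIter x 2, seqS x 2, PySem.Set.empty, sums) 2
      = (genIter x 3, seqS x 3, PySem.Set.empty, sums) := by
    simp only [stepA]; rw [if_neg (by norm_num)]
    have : seqS x 3 = ((seqS x 2).2.1, (seqS x 2).2.2.1, (seqS x 2).2.2.2, dP x 2) := by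
      show seqS x (2 + 1) = _; rw [seqS]
    rw [this]; rfl
  rw [h0, h1, h2]
  have ht := stepsA_tail x 1997 PySem.Set.empty sums
  rw [show ((1997 : Nat) : Int) + 3 = 2000 by norm_num,
    show (1997 + 3 : Nat) = 2000 from rfl] at ht
  rw [ht]

-- B: the prices loop, at tuple level
theorem pricesOf_fold (x : Int) : ∀ (n : Nat),
    (PySem.List.pyRange 0 (n : Int) 1).foldl
      (fun (st : Int × List Int) _ => let y := gen st.1; (y, st.2 ++ [PySem.Int.mod y 10]))
      (x, [PySem.Int.mod x 10])
    = (genIter x n, (List.range (n + 1)).map (P x)) := by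
  intro n
  induction n with
  | zero =>
    rw [show ((0 : Nat) : Int) = 0 from rfl, PySem.List.pyRange_one_eq_nil le_rfl]
    simp [genIter, P]
  | succ n ih =>
    rw [show ((n + 1 : Nat) : Int) = (n : Int) + 1 by push_cast; ring,
      PySem.List.pyRange_one_succ_right (by positivity), List.foldl_append, ih]
    simp only [List.foldl_cons, List.foldl_nil]
    rw [List.range_succ (n := n + 1), List.map_append]
    rfl

theorem pricesOf_eq (x : Int) :
    pricesOf x = (genIter x 2000, (List.range 2001).map (P x)) := by
  unfold pricesOf
  have h := pricesOf_fold x 2000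
  rw [show ((2000 : Nat) : Int) = (2000 : Int) by norm_num] at h
  exact h

theorem prices_get (x : Int) (j : Int) (h0 : 0 ≤ j) (h : j < 2001) :
    PySem.List.pyGetD ((List.range 2001).map (P x)) j 0 = P x j.toNat := by
  obtain ⟨k, rfl⟩ : ∃ k : Nat, j = (k : Int) := ⟨j.toNat, by omega⟩
  rw [PySem.List.pyGetD_natCast]
  have hk : k < 2001 := by exact_mod_cast h
  simp [List.getD, List.getElem?_map, List.getElem?_range hk]

theorem diffs_get (x : Int) (j : Int) (h0 : 0 ≤ j) (h : j < 2000) :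
    PySem.List.pyGetD (diffsOf ((List.range 2001).map (P x))) j 0 = dP x j.toNat := by
  unfold diffsOf
  rw [PySem.List.pyGetD_map_pyRange_of_nonneg _ 2000 j 0 h0 h]
  rw [prices_get x j h0 (by omega), prices_get x (j + 1) (by omega) (by omega)]
  rw [show (j + 1).toNat = j.toNat + 1 by omega]
  rfl

theorem localOf_eq (x : Int) :
    localOf ((List.range 2001).map (P x)) (diffsOf ((List.range 2001).map (P x)))
      = ((List.range 1997).map (ev x)).foldl
          (fun d kv => PySem.Dict.setdefault d kv.1 kv.2) PySem.Dict.empty := by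
  unfold localOf
  rw [PySem.List.foldl_congr_mem _ _
    (fun (d : PySem.Dict Seq4 Int) j => PySem.Dict.setdefault d (ev x j.toNat).1 (ev x j.toNat).2)
    _ ?_]
  · rw [show (1997 : Int) = ((1997 : Nat) : Int) by norm_num, PySem.List.pyRange_zero_natCast,
      List.foldl_map, List.foldl_map]
    apply PySem.List.foldl_congr_mem
    intro acc k _
    simp
  · intro acc j hj
    rw [PySem.List.mem_pyRange_one] at hj
    obtain ⟨hj0, hj1⟩ := hj
    rw [diffs_get x j hj0 (by omega), diffs_get x (j + 1) (by omega) (by omega),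
      diffs_get x (j + 2) (by omega) (by omega), diffs_get x (j + 3) (by omega) (by omega),
      prices_get x (j + 4) (by omega) (by omega)]
    rw [show (j + 1).toNat = j.toNat + 1 by omega, show (j + 2).toNat = j.toNat + 2 by omega,
      show (j + 3).toNat = j.toNat + 3 by omega, show (j + 4).toNat = j.toNat + 4 by omega]
    simp only [ev, seqS_add_four]

theorem buyerB_eq (sums : PySem.Dict Seq4 Int) (x : Int) :
    buyerB sums x = (FO PySem.Set.empty ((List.range 1997).map (ev x))).foldl mergeKV sums := by
  unfold buyerB
  rw [pricesOf_eq]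
  show (PySem.Dict.items (localOf _ _)).foldl _ sums = _
  rw [localOf_eq,
    setdefault_fold ((List.range 1997).map (ev x)) PySem.Dict.empty PySem.Set.empty
      (fun k => by rw [PySem.Dict.contains_empty]; rfl)]
  rw [show (PySem.Dict.empty : PySem.Dict Seq4 Int).items = [] from rfl, List.nil_append]
  rfl

theorem buyer_agree (sums : PySem.Dict Seq4 Int) (x : Int) :
    (loopA sums x).2.2.2 = buyerB sums x := by
  calc (loopA sums x).2.2.2
      = (AF PySem.Set.empty sums ((List.range 1997).map (ev x))).2 := by rw [loopA_eq]
    _ = (FO PySem.Set.empty ((List.range 1997).map (ev x))).foldl mergeKV sums :=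
        AF_snd_eq _ _ _
    _ = buyerB sums x := (buyerB_eq sums x).symm

-- ===== VERDICT (by name: the statement is the Claim_ definition above) =====
theorem part2_spec : Claim_equal_part2 := by
  intro src _ _
  unfold Spec_part2 part2 part2_alt
  rw [PySem.List.foldl_congr_mem _ _
    (fun sums line => buyerB sums ((PySem.Int.ofStr? line).getD 0)) _
    (fun acc line _ => buyer_agree acc _)]
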